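-- pv_equiv track=rewrite | github.com/michaeltaranik/algos | selection_algo.py | maximal_step_k_length
-- ===== SOURCE A (Python) =====
-- def maximal_step_k_length(arr, k):
--     current = 1
--     maximum = current
--     i = 0
--     while i < len(arr) - 1:
--         if arr[i] - arr[i + 1] == k:
--             current += 1
--             if current > maximum:
--                 maximum = current
--         else:
--             current = 1
--         i += 1
--
--     return maximum
-- ===== SOURCE B (Python) =====
-- def maximal_step_k_length(arr, k):
--     # phase 1: derived pairwise-match pattern
--     matches = [arr[i] - arr[i + 1] == k for i in range(len(arr) - 1)]
--     # phase 2: lengths of all runs of consecutive matches, then take the best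
--     runs = [0]
--     for m in matches:
--         if m:
--             runs[-1] += 1
--         else:
--             runs.append(0)
--     return 1 + max(runs)
-- ===== Notes on version B (the rewrite author's own statement) =====
-- stated objective: alternative
-- what changed: Replaces A's single stateful while-loop (current/maximum counters over indices) by a two-phase decomposition: first build the boolean pairwise-match sequence, then recursively compute all run lengths of consecutive matches and return 1 + their maximum.
import Mathlib
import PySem

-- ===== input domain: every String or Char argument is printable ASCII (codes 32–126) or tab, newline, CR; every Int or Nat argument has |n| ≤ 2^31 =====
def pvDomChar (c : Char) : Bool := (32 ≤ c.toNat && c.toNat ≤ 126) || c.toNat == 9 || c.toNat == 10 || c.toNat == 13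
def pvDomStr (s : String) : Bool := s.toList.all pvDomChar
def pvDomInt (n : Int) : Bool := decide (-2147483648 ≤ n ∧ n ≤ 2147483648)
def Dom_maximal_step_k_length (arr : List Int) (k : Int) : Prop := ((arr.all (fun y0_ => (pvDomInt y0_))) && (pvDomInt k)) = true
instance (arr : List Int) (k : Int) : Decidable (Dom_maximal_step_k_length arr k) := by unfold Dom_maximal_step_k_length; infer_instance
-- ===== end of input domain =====

-- B replaces A's stateful while-loop with a two-phase decomposition (match pattern, then run lengths + max); objective: alternative.

-- ===== PORT A =====
-- the while loop; it runs exactly (len arr - 1) - i times, so the guard 'i < len(arr) - 1' is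
-- encoded as the structural fuel (len arr - 1) - i; indices i and i+1 are in range, so pyGetD is exact
def pvLoopA (arr : List Int) (k : Int) : Nat → Nat → Int → Int → Int
  | 0, _, _, maximum => maximum
  | fuel + 1, i, current, maximum =>
    if PySem.List.pyGetD arr (i : Int) 0 - PySem.List.pyGetD arr ((i : Int) + 1) 0 == k then
      pvLoopA arr k fuel (i + 1) (current + 1)
        (if current + 1 > maximum then current + 1 else maximum)
    else
      pvLoopA arr k fuel (i + 1) 1 maximum

def maximal_step_k_length (arr : List Int) (k : Int) : Int :=
  pvLoopA arr k (arr.length - 1) 0 1 1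

-- ===== PORT B =====
-- one step of Source B's run-length loop: 'runs[-1] += 1' (runs is never empty, so getLast? is exact)
-- or 'runs.append(0)'
def pvStep (runs : List Int) (m : Bool) : List Int :=
  if m then runs.dropLast ++ [runs.getLast?.getD 0 + 1] else runs ++ [0]

def maximal_step_k_length_alt (arr : List Int) (k : Int) : Int :=
  let ms := (List.range (arr.length - 1)).map
    (fun (i : Nat) => PySem.List.pyGetD arr (i : Int) 0 - PySem.List.pyGetD arr ((i : Int) + 1) 0 == k)
  let runs := ms.foldl pvStep [0]
  -- max over a non-empty list (runs is never empty, so the getD default is unreachable)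
  1 + (PySem.List.max? runs (fun x => x)).getD 0

-- ===== PRECONDITION & SPEC =====
def Spec_maximal_step_k_length (arr : List Int) (k : Int) (out : Int) : Prop := out = maximal_step_k_length_alt arr k
instance (arr : List Int) (k : Int) (out : Int) : Decidable (Spec_maximal_step_k_length arr k out) := by unfold Spec_maximal_step_k_length; infer_instance

-- ===== CLAIM (what is proved, stated in full; the proofs are below) =====
def Claim_equal_maximal_step_k_length : Prop := ∀ (arr : List Int) (k : Int), Dom_maximal_step_k_length arr k → Spec_maximal_step_k_length arr k (maximal_step_k_length arr k)

-- ===== LEMMAS AND PROOFS =====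

-- the match pattern, shared by both analyses
def pvMatches (arr : List Int) (k : Int) : List Bool :=
  (List.range (arr.length - 1)).map
    (fun (i : Nat) => PySem.List.pyGetD arr (i : Int) 0 - PySem.List.pyGetD arr ((i : Int) + 1) 0 == k)

-- A's loop re-expressed as a scan over the remaining match pattern
def pvScanA : List Bool → Int → Int → Int
  | [], _, mx => mx
  | m :: ms, cur, mx =>
    if m then pvScanA ms (cur + 1) (if cur + 1 > mx then cur + 1 else mx)
    else pvScanA ms 1 mx

theorem pvMatches_length (arr : List Int) (k : Int) :
    (pvMatches arr k).length = arr.length - 1 := by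
  simp [pvMatches]

theorem pvLoopA_eq_scan (arr : List Int) (k : Int) :
    ∀ (fuel i : Nat) (cur mx : Int), fuel + i = arr.length - 1 →
      pvLoopA arr k fuel i cur mx = pvScanA ((pvMatches arr k).drop i) cur mx := by
  intro fuel
  induction fuel with
  | zero =>
    intro i cur mx hf
    rw [List.drop_eq_nil_of_le (by rw [pvMatches_length]; omega)]
    rfl
  | succ fuel ih =>
    intro i cur mx hf
    rw [List.drop_eq_getElem_cons (by rw [pvMatches_length]; omega)]
    have hmi : (pvMatches arr k)[i]'(by rw [pvMatches_length]; omega) =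
        (PySem.List.pyGetD arr (i : Int) 0 - PySem.List.pyGetD arr ((i : Int) + 1) 0 == k) := by
      unfold pvMatches
      rw [List.getElem_map, List.getElem_range]
    rw [hmi, pvLoopA]
    by_cases hm : (PySem.List.pyGetD arr (i : Int) 0 - PySem.List.pyGetD arr ((i : Int) + 1) 0 == k) = true
    · simp only [pvScanA, hm, if_true]
      exact ih (i + 1) _ _ (by omega)
    · simp only [pvScanA, hm, if_false, Bool.false_eq_true]
      exact ih (i + 1) _ _ (by omega)

-- max of a run-length list (nonempty lists only; [] case is a junk value)
def pvMaxOf : List Int → Int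
  | [] => 0
  | x :: t => t.foldl max x

theorem pvMaxOf_append (rs : List Int) (hne : rs ≠ []) (v : Int) :
    pvMaxOf (rs ++ [v]) = max (pvMaxOf rs) v := by
  cases rs with
  | nil => exact absurd rfl hne
  | cons x t => simp [pvMaxOf, List.foldl_append]

theorem le_pvMaxOf (rs : List Int) (z : Int) (hz : z ∈ rs) : z ≤ pvMaxOf rs := by
  cases rs with
  | nil => cases hz
  | cons x t =>
    have h := PySem.List.max?_isMax (xs := x :: t) (key := fun y => y)
      (PySem.List.max?_id_cons x t) z hz
    simpa [pvMaxOf] using h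

theorem pvMaxOf_dropLast_append (rs : List Int) (hne : rs ≠ []) (w : Int)
    (hw : rs.getLast?.getD 0 ≤ w) :
    pvMaxOf (rs.dropLast ++ [w]) = max (pvMaxOf rs) w := by
  obtain ⟨ys, a, rfl⟩ := (List.eq_nil_or_concat rs).resolve_left hne
  simp only [List.concat_eq_append] at hw ⊢
  rw [List.dropLast_concat]
  rw [List.getLast?_concat] at hw
  simp only [Option.getD_some] at hw
  cases ys with
  | nil => simp [pvMaxOf]; omega
  | cons y t =>
    rw [pvMaxOf_append (y :: t) (by simp) w, pvMaxOf_append (y :: t) (by simp) a]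
    omega

theorem pvStep_ne_nil (rs : List Int) (m : Bool) : pvStep rs m ≠ [] := by
  cases m <;> simp [pvStep]

theorem foldl_pvStep_ne_nil : ∀ (ms2 : List Bool) (rs : List Int), rs ≠ [] →
    ms2.foldl pvStep rs ≠ [] := by
  intro ms2
  induction ms2 with
  | nil => intro rs h; simpa using h
  | cons m t ih => intro rs _; exact ih (pvStep rs m) (pvStep_ne_nil rs m)

theorem pvScanA_eq_fold : ∀ (ms2 : List Bool) (rs : List Int) (cur mx : Int),
    rs ≠ [] → cur = 1 + rs.getLast?.getD 0 → mx = 1 + pvMaxOf rs → (∀ x ∈ rs, 0 ≤ x) →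
    pvScanA ms2 cur mx = 1 + pvMaxOf (ms2.foldl pvStep rs) := by
  intro ms2
  induction ms2 with
  | nil =>
    intro rs cur mx _ _ hm _
    simpa [pvScanA] using hm
  | cons m t ih =>
    intro rs cur mx hne hc hm hpos
    obtain ⟨ys, a, rfl⟩ := (List.eq_nil_or_concat rs).resolve_left hne
    simp only [List.concat_eq_append] at hne hc hm hpos ⊢
    rw [List.getLast?_concat] at hc
    simp only [Option.getD_some] at hc
    have ha0 : (0 : Int) ≤ a := hpos a (by simp)
    have hmax0 : (0 : Int) ≤ pvMaxOf (ys ++ [a]) := le_trans ha0 (le_pvMaxOf _ a (by simp))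
    cases m
    · -- no match: current run closes, a fresh 0 is appended
      rw [show pvScanA (false :: t) cur mx = pvScanA t 1 mx from by simp [pvScanA]]
      rw [List.foldl_cons, show pvStep (ys ++ [a]) false = (ys ++ [a]) ++ [0] from by simp [pvStep]]
      apply ih
      · simp
      · rw [List.getLast?_concat]
        simp
      · rw [hm, pvMaxOf_append (ys ++ [a]) (by simp) 0]
        omega
      · intro x hx
        rcases List.mem_append.1 hx with h | h
        · exact hpos x h
        · simp at h; omega
    · -- match: the last run grows by one
      have hmx' : (if cur + 1 > mx then cur + 1 else mx) = max mx (cur + 1) := by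
        split_ifs <;> omega
      have hstep : pvStep (ys ++ [a]) true = ys ++ [a + 1] := by
        simp [pvStep]
      have h2 : pvMaxOf (ys ++ [a + 1]) = max (pvMaxOf (ys ++ [a])) (a + 1) := by
        have h3 := pvMaxOf_dropLast_append (ys ++ [a]) (by simp) (a + 1)
          (by rw [List.getLast?_concat]; simp)
        rw [List.dropLast_concat] at h3
        exact h3
      rw [show pvScanA (true :: t) cur mx
            = pvScanA t (cur + 1) (if cur + 1 > mx then cur + 1 else mx) from by simp [pvScanA]]
      rw [hmx', List.foldl_cons, hstep]
      apply ih
      · simp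
      · rw [List.getLast?_concat]
        simp
        omega
      · rw [h2, hm, hc]
        omega
      · intro x hx
        rcases List.mem_append.1 hx with h | h
        · exact hpos x (List.mem_append_left _ h)
        · simp at h; omega

-- ===== VERDICT (by name: the statement is the Claim_ definition above) =====
theorem maximal_step_k_length_spec : Claim_equal_maximal_step_k_length := by
  intro arr k _
  unfold Spec_maximal_step_k_length maximal_step_k_length
  rw [pvLoopA_eq_scan arr k (arr.length - 1) 0 1 1 (by omega), List.drop_zero,
    pvScanA_eq_fold (pvMatches arr k) [0] 1 1 (by simp) (by simp) (by simp [pvMaxOf]) (by simp)]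
  have hne : (pvMatches arr k).foldl pvStep [0] ≠ [] :=
    foldl_pvStep_ne_nil (pvMatches arr k) [0] (by simp)
  obtain ⟨y, t2, hyt⟩ := List.exists_cons_of_ne_nil hne
  have e : maximal_step_k_length_alt arr k
      = 1 + (PySem.List.max? ((pvMatches arr k).foldl pvStep [0]) (fun x => x)).getD 0 := rfl
  rw [e, hyt, PySem.List.max?_id_cons]
  simp [pvMaxOf]
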